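-- pv_equiv track=rewrite | github.com/mattbeck1/amides | normalization_exp.py | quote_variations
-- ===== SOURCE A (Python) =====
-- def quote_variations(cmd_line):
--     tokens = cmd_line.split()
--     variants = [list(tokens)]
--     for i, t in enumerate(tokens):
--         temp_variants = variants.copy()
--         if t[0] == '"' and t[-1] == '"':
--             for v in variants:
--                 temp = v.copy()
--                 temp[i] = t.replace('"', '')
--                 temp_variants.append(temp)
--             variants = temp_variants
--     return variants
-- ===== SOURCE B (Python) =====
-- def quote_variations(cmd_line):
--     tokens = cmd_line.split()
--     quoted = [(i, t.replace('"', ''))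
--               for i, t in enumerate(tokens)
--               if t[0] == '"' and t[-1] == '"']
--     variants = []
--     for mask in range(2 ** len(quoted)):
--         v = list(tokens)
--         m = mask
--         for i, s in quoted:
--             if m % 2 == 1:
--                 v[i] = s
--             m //= 2
--         variants.append(v)
--     return variants
-- ===== Notes on version B (the rewrite author's own statement) =====
-- stated objective: alternative
-- what changed: B enumerates the subset space directly with bitmasks over the precomputed quoted-token positions (low bit = first quoted token), instead of A's iterative doubling of a growing list of variants.
import Mathlib
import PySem

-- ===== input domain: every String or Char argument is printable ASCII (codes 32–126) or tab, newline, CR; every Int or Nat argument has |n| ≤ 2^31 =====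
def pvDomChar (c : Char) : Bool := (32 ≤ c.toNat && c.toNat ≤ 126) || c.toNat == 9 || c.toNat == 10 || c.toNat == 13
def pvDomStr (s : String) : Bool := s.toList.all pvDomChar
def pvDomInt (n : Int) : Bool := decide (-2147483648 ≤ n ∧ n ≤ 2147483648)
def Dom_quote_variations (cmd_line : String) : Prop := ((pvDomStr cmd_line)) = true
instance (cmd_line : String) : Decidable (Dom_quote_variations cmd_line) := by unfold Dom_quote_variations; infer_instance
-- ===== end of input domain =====

-- B replaces A's iterative doubling of the variants list by direct bitmask enumeration of the
-- subsets of quoted-token positions (low bit = first quoted token); same cost, different algorithm.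

-- shared helpers: the quote test t[0] == '"' and t[-1] == '"' and t.replace('"', '')
def pvIsQuoted (t : String) : Bool :=
  (PySem.Str.pyGet? t 0 == some '"') && (PySem.Str.pyGet? t (-1) == some '"')

def pvStrip (t : String) : String := PySem.Str.replace t "\"" ""

-- ===== PORT A =====
def quote_variations (cmd_line : String) : List (List String) :=
  let tokens := PySem.Str.split₀ cmd_line
  (PySem.List.enumerate tokens).foldl
    (fun variants p =>
      if pvIsQuoted p.2 then
        variants ++ variants.map (fun v => PySem.List.pySetD v p.1 (pvStrip p.2))
      else variants)
    [tokens]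

-- ===== PORT B =====
-- inner loop of Source B: for (i, s) in quoted: if m % 2 == 1: v[i] = s; m //= 2
def pvApplyMask : Nat → List (Int × String) → List String → List String
  | _, [], v => v
  | m, q :: rest, v =>
      pvApplyMask (m / 2) rest (if m % 2 = 1 then PySem.List.pySetD v q.1 q.2 else v)

def quote_variations_alt (cmd_line : String) : List (List String) :=
  let tokens := PySem.Str.split₀ cmd_line
  let quoted := (PySem.List.enumerate tokens).filterMap
    (fun p => if pvIsQuoted p.2 then some (p.1, pvStrip p.2) else none)
  (List.range (2 ^ quoted.length)).map (fun mask => pvApplyMask mask quoted tokens)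

-- ===== PRECONDITION & SPEC =====
def Spec_quote_variations (cmd_line : String) (out : List (List String)) : Prop := out = quote_variations_alt cmd_line
instance (cmd_line : String) (out : List (List String)) : Decidable (Spec_quote_variations cmd_line out) := by unfold Spec_quote_variations; infer_instance

-- ===== CLAIM (what is proved, stated in full; the proofs are below) =====
def Claim_equal_quote_variations : Prop := ∀ (cmd_line : String), Dom_quote_variations cmd_line → Spec_quote_variations cmd_line (quote_variations cmd_line)

-- ===== LEMMAS AND PROOFS =====

-- A's conditional fold over all enumerated tokens is the unconditional doubling fold over the quoted ones
lemma pv_fold_filterMap (l : List (Int × String)) (V : List (List String)) :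
    l.foldl
      (fun vs p =>
        if pvIsQuoted p.2 then vs ++ vs.map (fun v => PySem.List.pySetD v p.1 (pvStrip p.2))
        else vs) V
    = (l.filterMap (fun p => if pvIsQuoted p.2 then some (p.1, pvStrip p.2) else none)).foldl
        (fun vs q => vs ++ vs.map (fun v => PySem.List.pySetD v q.1 q.2)) V := by
  induction l generalizing V with
  | nil => rfl
  | cons p rest ih =>
      by_cases h : pvIsQuoted p.2 = true
      · simp [List.foldl, h, ih]
      · simp [List.foldl, h, ih]

-- flatMap over range (2*k) splits each pair of consecutive masks
lemma pv_range_double {α : Type} (g : Nat → List α) (k : Nat) :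
    (List.range (2 * k)).flatMap g
      = (List.range k).flatMap (fun m => g (2 * m) ++ g (2 * m + 1)) := by
  induction k with
  | zero => rfl
  | succ k ih =>
      have h2 : 2 * (k + 1) = (2 * k + 1) + 1 := by ring
      rw [h2, List.range_succ, List.range_succ, List.range_succ,
          List.flatMap_append, List.flatMap_append, List.flatMap_append, ih]
      simp [List.flatMap]

-- the doubling fold enumerates exactly the bitmask applications, masks in increasing order
lemma pv_doubling (qs : List (Int × String)) (V : List (List String)) :
    qs.foldl (fun vs q => vs ++ vs.map (fun v => PySem.List.pySetD v q.1 q.2)) V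
      = (List.range (2 ^ qs.length)).flatMap (fun m => V.map (fun v => pvApplyMask m qs v)) := by
  induction qs generalizing V with
  | nil => simp [pvApplyMask]
  | cons q rest ih =>
      rw [List.foldl_cons, ih]
      have hp : 2 ^ (q :: rest).length = 2 * 2 ^ rest.length := by
        simp [List.length_cons, pow_succ]; ring
      rw [hp, pv_range_double]
      congr 1
      funext m
      have h1 : 2 * m % 2 = 0 := by omega
      have h2 : 2 * m / 2 = m := by omega
      have h3 : (2 * m + 1) % 2 = 1 := by omega
      have h4 : (2 * m + 1) / 2 = m := by omega
      simp [pvApplyMask, h1, h2, h3, h4, List.map_append, List.map_map, Function.comp]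

-- flatMap of singleton-producing function is map
lemma pv_flatMap_singleton {α β : Type} (l : List α) (f : α → β) :
    l.flatMap (fun x => [f x]) = l.map f := by
  induction l with
  | nil => rfl
  | cons x xs ih => simp [List.flatMap_cons, ih]

theorem quote_variations_spec : Claim_equal_quote_variations := by
  intro cmd_line _
  unfold Spec_quote_variations quote_variations quote_variations_alt
  rw [pv_fold_filterMap, pv_doubling]
  simp [pv_flatMap_singleton]
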